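-- pv_equiv track=rewrite | github.com/pypi-data/pypi-mirror-65 | packages/readtagger/readtagger-0.5.24-py3-none-any.whl/readtagger/cli/readtagger_cli.py | parse_file_tags
-- ===== SOURCE A (Python) =====
-- def parse_file_tags(filetags):
--     """
--     Parse list of filetags from commandline.
--
--     :param filetags: list of strings with filepath.
--                      optionally appended by the first letter that should be used for read and mate
--     :return: annotate_with, tag_prefix, tag_prefix_mate
--
--     >>> filetags = ('file_a:A:B', 'file_b:C:D', 'file_c')
--     >>> annotate_with, tag_prefix, tag_prefix_mate = parse_file_tags(filetags)
--     >>> annotate_with == ['file_a', 'file_b', 'file_c'] and tag_prefix == ['A', 'C', 'A'] and tag_prefix_mate == ['B', 'D', 'B']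
--     True
--     >>>
--     """
--     annotate_with = []
--     tag_prefix = []
--     tag_prefix_mate = []
--     for filetag in filetags:
--         if ':' in filetag:
--             filepath, tag, tag_mate = filetag.split(':')
--             annotate_with.append(filepath)
--             tag_prefix.append(tag.upper())
--             tag_prefix_mate.append(tag_mate.upper())
--         else:
--             annotate_with.append(filetag)
--             tag_prefix.append('A')  # Default is A for read, B for mate
--             tag_prefix_mate.append('B')
--     return annotate_with, tag_prefix, tag_prefix_mate
-- ===== SOURCE B (Python) =====
-- def parse_file_tags(filetags):
--     """Divide and conquer: parse each half recursively and concatenate the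
--     three resulting list pairs; base cases are the empty and singleton lists."""
--     filetags = list(filetags)
--     n = len(filetags)
--     if n == 0:
--         return [], [], []
--     if n == 1:
--         ft = filetags[0]
--         if ':' in ft:
--             filepath, tag, tag_mate = ft.split(':')
--             return [filepath], [tag.upper()], [tag_mate.upper()]
--         return [ft], ['A'], ['B']
--     mid = n // 2
--     la, lt, lm = parse_file_tags(filetags[:mid])
--     ra, rt, rm = parse_file_tags(filetags[mid:])
--     return la + ra, lt + rt, lm + rm
-- ===== Notes on version B (the rewrite author's own statement) =====
-- stated objective: alternative
-- what changed: B parses the list by divide and conquer - split in half, recurse on each half, concatenate the three list pairs - instead of A's single loop appending into three accumulator lists.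
import Mathlib
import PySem

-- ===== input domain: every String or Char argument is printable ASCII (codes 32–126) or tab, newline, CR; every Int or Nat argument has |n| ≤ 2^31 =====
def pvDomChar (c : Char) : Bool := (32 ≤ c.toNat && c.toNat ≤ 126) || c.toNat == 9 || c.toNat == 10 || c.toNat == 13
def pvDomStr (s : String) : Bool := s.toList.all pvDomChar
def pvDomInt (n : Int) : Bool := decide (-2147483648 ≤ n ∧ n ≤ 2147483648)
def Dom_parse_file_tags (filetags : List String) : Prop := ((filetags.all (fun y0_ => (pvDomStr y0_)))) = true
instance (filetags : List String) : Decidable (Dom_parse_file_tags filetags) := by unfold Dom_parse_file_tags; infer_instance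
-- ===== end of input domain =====

-- B parses the list by divide and conquer (halve, recurse, concatenate) instead of A's loop with three accumulator lists (objective: alternative).

-- ===== PORT A =====
-- loop with the three accumulator lists; the `_ =>` branch is Python's ValueError on a split that is not 3 parts (excluded by Pre_)
def parse_file_tags_go (filetags aw tp tpm : List String) : List String × List String × List String :=
  match filetags with
  | [] => (aw, tp, tpm)
  | ft :: rest =>
    if PySem.Str.isIn ":" ft then
      match (PySem.Str.split? ft ":").getD [] with
      | [fp, t, tm] =>
          parse_file_tags_go rest (aw ++ [fp]) (tp ++ [PySem.Str.upper t]) (tpm ++ [PySem.Str.upper tm])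
      | _ => (aw, tp, tpm)
    else
      parse_file_tags_go rest (aw ++ [ft]) (tp ++ ["A"]) (tpm ++ ["B"])

def parse_file_tags (filetags : List String) : List String × List String × List String :=
  parse_file_tags_go filetags [] [] []

-- ===== PORT B =====
-- divide and conquer; filetags[:mid] / filetags[mid:] with 0 ≤ mid ≤ len are exactly take/drop;
-- the `_ =>` branch in the singleton case is Python's ValueError on a bad split (excluded by Pre_)
def parse_file_tags_alt (filetags : List String) : List String × List String × List String :=
  match filetags with
  | [] => ([], [], [])
  | [ft] =>
    if PySem.Str.isIn ":" ft then
      match (PySem.Str.split? ft ":").getD [] with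
      | [fp, t, tm] => ([fp], [PySem.Str.upper t], [PySem.Str.upper tm])
      | _ => ([ft], [], [])
    else
      ([ft], ["A"], ["B"])
  | ft1 :: ft2 :: rest =>
    let l := ft1 :: ft2 :: rest
    let mid := l.length / 2
    let left := parse_file_tags_alt (l.take mid)
    let right := parse_file_tags_alt (l.drop mid)
    (left.1 ++ right.1, left.2.1 ++ right.2.1, left.2.2 ++ right.2.2)
termination_by filetags.length
decreasing_by
  · simp; omega
  · simp; omega

-- ===== PRECONDITION & SPEC =====
-- Pre_ excludes items containing ':' whose split is not exactly 3 parts: there Python's unpacking raises ValueError (in A and in B alike).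
def Pre_parse_file_tags (filetags : List String) : Prop :=
  ∀ s ∈ filetags, PySem.Str.isIn ":" s = true → ((PySem.Str.split? s ":").getD []).length = 3
instance (filetags : List String) : Decidable (Pre_parse_file_tags filetags) := by unfold Pre_parse_file_tags; infer_instance
def pvWitness_parse_file_tags : List String := ["file_a:A:B", "file_c"]

def Spec_parse_file_tags (filetags : List String) (out : List String × List String × List String) : Prop := out = parse_file_tags_alt filetags
instance (filetags : List String) (out : List String × List String × List String) : Decidable (Spec_parse_file_tags filetags out) := by unfold Spec_parse_file_tags; infer_instance

-- ===== CLAIM (what is proved, stated in full; the proofs are below) =====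
def Claim_equal_parse_file_tags : Prop := ∀ (filetags : List String), Dom_parse_file_tags filetags → Pre_parse_file_tags filetags → Spec_parse_file_tags filetags (parse_file_tags filetags)

-- ===== LEMMAS AND PROOFS =====
-- proof helper: the triple either program derives from one item (not used by the ports)
def pvTrip (ft : String) : String × String × String :=
  if PySem.Str.isIn ":" ft then
    match (PySem.Str.split? ft ":").getD [] with
    | [fp, t, tm] => (fp, PySem.Str.upper t, PySem.Str.upper tm)
    | _ => (ft, "", "")
  else
    (ft, "A", "B")

-- B computes the three columns of the per-item triples (under Pre_: every ':'-item splits into 3)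
theorem parse_file_tags_alt_eq (filetags : List String) :
    Pre_parse_file_tags filetags →
    parse_file_tags_alt filetags =
      ((filetags.map pvTrip).map (·.1),
       (filetags.map pvTrip).map (·.2.1),
       (filetags.map pvTrip).map (·.2.2)) := by
  induction filetags using parse_file_tags_alt.induct with
  | case1 => intro _; simp [parse_file_tags_alt]
  | case2 ft hin fp t tm hm =>
    intro _
    have hin' : PySem.Chars.isIn [':'] ft.toList = true := by simpa [PySem.Str.isIn] using hin
    simp [parse_file_tags_alt, pvTrip, hin', hm]
  | case3 ft hin hbad =>
    intro h
    exfalso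
    have hlen := h ft (by simp) hin
    match hm : (PySem.Str.split? ft ":").getD [] with
    | [fp, t, tm] => exact hbad fp t tm hm
    | [] | [_] | [_, _] | _ :: _ :: _ :: _ :: _ => simp [hm] at hlen
  | case4 ft hin =>
    intro _
    have hin' : PySem.Chars.isIn [':'] ft.toList ≠ true := by simpa [PySem.Str.isIn] using hin
    simp [parse_file_tags_alt, pvTrip, hin']
  | case5 ft1 ft2 rest l mid ihl ihr =>
    intro h
    have hl := ihl (fun s hs => h s (List.take_subset _ _ hs))
    have hr := ihr (fun s hs => h s (List.drop_subset _ _ hs))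
    unfold parse_file_tags_alt
    simp only
    rw [hl, hr]
    have hsplit := List.take_append_drop ((ft1 :: ft2 :: rest).length / 2) (ft1 :: ft2 :: rest)
    conv_rhs => rw [← hsplit]
    simp only [List.map_append]
    rfl

-- A's accumulator loop appends exactly those columns (under Pre_)
theorem parse_file_tags_go_eq (filetags : List String)
    (h : Pre_parse_file_tags filetags) :
    ∀ aw tp tpm : List String,
      parse_file_tags_go filetags aw tp tpm =
        (aw ++ (filetags.map pvTrip).map (·.1),
         tp ++ (filetags.map pvTrip).map (·.2.1),
         tpm ++ (filetags.map pvTrip).map (·.2.2)) := by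
  induction filetags with
  | nil => intro aw tp tpm; simp [parse_file_tags_go]
  | cons ft rest ih =>
    intro aw tp tpm
    have hft := h ft (List.mem_cons_self ..)
    have hrest : Pre_parse_file_tags rest := fun s hs => h s (List.mem_cons_of_mem _ hs)
    by_cases hin : PySem.Chars.isIn [':'] ft.toList = true
    · obtain ⟨fp, t, tm, hsplit⟩ : ∃ fp t tm, (PySem.Str.split? ft ":").getD [] = [fp, t, tm] := by
        have := hft (by simpa using hin)
        match hm : (PySem.Str.split? ft ":").getD [] with
        | [fp, t, tm] => exact ⟨fp, t, tm, rfl⟩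
        | [] | [_] | [_, _] | _ :: _ :: _ :: _ :: _ => simp [hm] at this
      simp [parse_file_tags_go, pvTrip, hin, hsplit, ih hrest]
    · simp [parse_file_tags_go, pvTrip, hin, ih hrest]

-- ===== VERDICT (by name: the statement is the Claim_ definition above) =====
theorem parse_file_tags_spec : Claim_equal_parse_file_tags := by
  intro filetags _ hpre
  unfold Spec_parse_file_tags parse_file_tags
  rw [parse_file_tags_go_eq filetags hpre, parse_file_tags_alt_eq filetags hpre]
  simp
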